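-- pv_equiv track=rewrite | github.com/RickHoreman/ATP | source/utilities.py | stringEndsWithAnyOf
-- ===== SOURCE A (Python) =====
-- from typing import Callable, List, TypeVar, Union, Tuple
--
-- def stringEndsWithAnyOf(input : str, endings : List[str]) -> Union[str, None]:
--     '''Checks if the input string ends with any of the listed endings, if so returns that ending, otherwise returns None.'''
--     if len(endings) <= 0:
--         return None
--     else:
--         ending, *rest = endings
--         if input.endswith(ending):
--             return ending
--         else:
--             return stringEndsWithAnyOf(input, rest)
-- ===== SOURCE B (Python) =====
-- from typing import List, Union
--
-- def stringEndsWithAnyOf(input : str, endings : List[str]) -> Union[str, None]: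
--     '''Iterative reformulation: scan the endings in order, return the first match.'''
--     for ending in endings:
--         if input.endswith(ending):
--             return ending
--     return None
-- ===== Notes on version B (the rewrite author's own statement) =====
-- stated objective: simpler
-- what changed: Replaced the head/rest recursion (which copies the tail list at every step) with a single explicit for-loop returning the first matching ending.
import Mathlib
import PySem

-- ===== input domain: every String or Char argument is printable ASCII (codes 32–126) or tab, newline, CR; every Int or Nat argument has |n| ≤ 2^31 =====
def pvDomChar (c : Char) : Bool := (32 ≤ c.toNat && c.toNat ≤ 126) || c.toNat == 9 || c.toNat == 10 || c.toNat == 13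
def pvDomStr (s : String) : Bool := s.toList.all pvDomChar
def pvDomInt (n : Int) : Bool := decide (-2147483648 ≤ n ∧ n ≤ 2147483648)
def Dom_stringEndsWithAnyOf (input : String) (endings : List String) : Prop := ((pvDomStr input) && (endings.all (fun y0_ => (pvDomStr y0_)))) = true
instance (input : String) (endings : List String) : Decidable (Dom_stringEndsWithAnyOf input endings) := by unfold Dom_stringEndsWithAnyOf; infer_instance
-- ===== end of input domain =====

-- B replaces A's recursion with a single iterative scan (a fold carrying the first match); same return value.

-- ===== PORT A =====
def stringEndsWithAnyOf (input : String) (endings : List String) : Option String :=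
  if endings.length ≤ 0 then none
  else
    match endings with
    | [] => none
    | ending :: rest =>
      if PySem.Str.endswith input ending then some ending
      else stringEndsWithAnyOf input rest

-- ===== PORT B =====
def stringEndsWithAnyOf_alt (input : String) (endings : List String) : Option String :=
  endings.foldl
    (fun acc ending =>
      match acc with
      | some r => some r
      | none => if PySem.Str.endswith input ending then some ending else none)
    none

-- ===== PRECONDITION & SPEC =====
def Spec_stringEndsWithAnyOf (input : String) (endings : List String) (out : Option String) : Prop := out = stringEndsWithAnyOf_alt input endings
instance (input : String) (endings : List String) (out : Option String) : Decidable (Spec_stringEndsWithAnyOf input endings out) := by unfold Spec_stringEndsWithAnyOf; infer_instance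

-- ===== CLAIM (what is proved, stated in full; the proofs are below) =====
def Claim_equal_stringEndsWithAnyOf : Prop := ∀ (input : String) (endings : List String), Dom_stringEndsWithAnyOf input endings → Spec_stringEndsWithAnyOf input endings (stringEndsWithAnyOf input endings)

-- ===== LEMMAS AND PROOFS =====
theorem foldl_some (input : String) (endings : List String) (r : String) :
    endings.foldl
      (fun acc ending =>
        match acc with
        | some r => some r
        | none => if PySem.Str.endswith input ending then some ending else none)
      (some r) = some r := by
  induction endings with
  | nil => rfl
  | cons e rest ih => simpa using ih

-- ===== VERDICT (by name: the statement is the Claim_ definition above) =====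
theorem stringEndsWithAnyOf_spec : Claim_equal_stringEndsWithAnyOf := by
  intro input endings hdom
  unfold Spec_stringEndsWithAnyOf
  induction endings with
  | nil => rfl
  | cons e rest ih =>
    have hdr : Dom_stringEndsWithAnyOf input rest := by
      unfold Dom_stringEndsWithAnyOf at hdom ⊢
      simp only [List.all_cons] at hdom
      simp_all
    simp only [stringEndsWithAnyOf, stringEndsWithAnyOf_alt, List.foldl]
    rw [if_neg (by simp)]
    by_cases h : PySem.Str.endswith input e = true
    · rw [if_pos h, if_pos h]
      exact (foldl_some input rest e).symm
    · rw [if_neg h, if_neg h]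
      exact ih hdr
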